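-- pv_equiv track=rewrite | github.com/gwimbly03/8005 | project/source/worker.py | _idx_to_guess
-- ===== SOURCE A (Python) =====
-- LEGALCHAR = "abcdefghijklmnopqrstuvwxyzABCDEFGHIJKLMNOPQRSTUVWXYZ0123456789@#%^&*()_+-=.,:;?"
--
-- def _idx_to_guess(idx: int, length: int) -> str:
--     base = len(LEGALCHAR)
--     chars = []
--     temp_idx = idx
--     for _ in range(length):
--         chars.append(LEGALCHAR[temp_idx % base])
--         temp_idx //= base
--     return ''.join(reversed(chars))
-- ===== SOURCE B (Python) =====
-- LEGALCHAR = "abcdefghijklmnopqrstuvwxyzABCDEFGHIJKLMNOPQRSTUVWXYZ0123456789@#%^&*()_+-=.,:;?"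
--
-- def _idx_to_guess(idx: int, length: int) -> str:
--     base = len(LEGALCHAR)
--     if length <= 0:
--         return ''
--     if length == 1:
--         return LEGALCHAR[idx % base]
--     lo = length // 2
--     return _idx_to_guess(idx // base ** lo, length - lo) + _idx_to_guess(idx, lo)
-- ===== Notes on version B (the rewrite author's own statement) =====
-- stated objective: alternative
-- what changed: Replaces A's length-step loop that collects base-80 digits LSB-first into a list, reverses it and joins, with a divide-and-conquer recursion that splits the output at the midpoint: the high half is the encoding of idx // base**lo and the low half the encoding of idx, concatenated directly with no list, no reversal and no join.
import Mathlib
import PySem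

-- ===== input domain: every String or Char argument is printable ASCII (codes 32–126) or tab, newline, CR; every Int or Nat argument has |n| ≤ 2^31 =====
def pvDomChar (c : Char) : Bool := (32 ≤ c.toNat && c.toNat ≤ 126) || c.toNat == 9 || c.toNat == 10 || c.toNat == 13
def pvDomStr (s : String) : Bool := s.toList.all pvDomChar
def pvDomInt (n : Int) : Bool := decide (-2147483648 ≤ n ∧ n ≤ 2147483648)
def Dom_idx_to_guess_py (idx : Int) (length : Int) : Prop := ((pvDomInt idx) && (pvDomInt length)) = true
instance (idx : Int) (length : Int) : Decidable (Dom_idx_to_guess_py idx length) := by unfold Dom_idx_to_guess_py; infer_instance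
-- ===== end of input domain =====

-- B replaces A's digit-list + reverse + join loop with a divide-and-conquer recursion:
-- the string splits at the midpoint into the encodings of idx // base**lo and of idx.


def LEGALCHAR : String := "abcdefghijklmnopqrstuvwxyzABCDEFGHIJKLMNOPQRSTUVWXYZ0123456789@#%^&*()_+-=.,:;?"

-- ===== PORT A =====
-- LEGALCHAR[j] is always in range (0 ≤ j < 79 by floor-mod), so .getD ' ' is exact;
-- ''.join(reversed(chars)) on a list of single chars is String.ofList chars.reverse.
def idx_to_guess_py (idx : Int) (length : Int) : String :=
  let base : Int := PySem.Str.len LEGALCHAR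
  let st := (PySem.List.pyRange 0 length 1).foldl
    (fun (st : List Char × Int) _ =>
      (st.1 ++ [(PySem.Str.pyGet? LEGALCHAR (PySem.Int.mod st.2 base)).getD ' '],
       PySem.Int.floordiv st.2 base))
    ([], idx)
  String.ofList st.1.reverse

-- ===== PORT B =====
-- The recursion is on length's toNat (length ≤ 0 → ''), so the two recursive calls take
-- n - lo and lo with lo = n/2; the string concatenations are carried out on List Char with
-- one String.ofList at the end; LEGALCHAR[j] is always in range (0 ≤ j < 79 by floor-mod),
-- so .getD ' ' is exact.
def pvAltGo : Int → Nat → List Char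
  | _, 0 => []
  | idx, 1 =>
      [(PySem.Str.pyGet? LEGALCHAR
          (PySem.Int.mod idx (PySem.Str.len LEGALCHAR))).getD ' ']
  | idx, n + 2 =>
      let lo : Nat := (n + 2) / 2
      pvAltGo (PySem.Int.floordiv idx ((PySem.Str.len LEGALCHAR) ^ lo)) (n + 2 - lo)
        ++ pvAltGo idx lo
  termination_by _ n => n
  decreasing_by all_goals omega

def idx_to_guess_py_alt (idx : Int) (length : Int) : String :=
  String.ofList (pvAltGo idx length.toNat)

-- ===== PRECONDITION & SPEC =====
def Spec_idx_to_guess_py (idx : Int) (length : Int) (out : String) : Prop := out = idx_to_guess_py_alt idx length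
instance (idx : Int) (length : Int) (out : String) : Decidable (Spec_idx_to_guess_py idx length out) := by unfold Spec_idx_to_guess_py; infer_instance

-- ===== CLAIM =====
def Claim_equal_idx_to_guess_py : Prop := ∀ (idx : Int) (length : Int), Dom_idx_to_guess_py idx length → Spec_idx_to_guess_py idx length (idx_to_guess_py idx length)

-- ===== LEMMAS AND PROOFS =====

def pvCh (j : Int) : Char := (PySem.Str.pyGet? LEGALCHAR j).getD ' '

def pvDig (t : Int) (k : Nat) : Char :=
  pvCh (PySem.Int.mod (PySem.Int.floordiv t ((79:Int) ^ k)) 79)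

theorem pvLen : PySem.Str.len LEGALCHAR = 79 := by decide

theorem pvFdivPow (t : Int) (m k : Nat) :
    PySem.Int.floordiv (PySem.Int.floordiv t ((79:Int) ^ m)) ((79:Int) ^ k)
      = PySem.Int.floordiv t ((79:Int) ^ (m + k)) := by
  have hm : (0:Int) < (79:Int) ^ m := by positivity
  have hk : (0:Int) < (79:Int) ^ k := by positivity
  have hmk : (0:Int) < (79:Int) ^ (m + k) := by positivity
  rw [PySem.Int.floordiv_eq_ediv_of_pos hm, PySem.Int.floordiv_eq_ediv_of_pos hk,
      PySem.Int.floordiv_eq_ediv_of_pos hmk,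
      Int.ediv_ediv_of_nonneg (le_of_lt hm), ← pow_add]

theorem pvDigShiftPow (t : Int) (m k : Nat) :
    pvDig (PySem.Int.floordiv t ((79:Int) ^ m)) k = pvDig t (m + k) := by
  unfold pvDig; rw [pvFdivPow]

theorem pvFdivStep (t : Int) (k : Nat) :
    PySem.Int.floordiv (PySem.Int.floordiv t 79) ((79:Int) ^ k)
      = PySem.Int.floordiv t ((79:Int) ^ (k + 1)) := by
  have h := pvFdivPow t 1 k
  rw [pow_one] at h
  rw [h, Nat.add_comm]

theorem pvFdivOne (t : Int) : PySem.Int.floordiv t 1 = t := by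
  rw [PySem.Int.floordiv_eq_ediv_of_pos one_pos, Int.ediv_one]

-- A's loop collects the base-79 digits of idx least-significant first.
theorem pvLoop {α : Type} (l : List α) : ∀ (t : Int) (acc : List Char),
    l.foldl (fun (st : List Char × Int) _ =>
       (st.1 ++ [(PySem.Str.pyGet? LEGALCHAR (PySem.Int.mod st.2 79)).getD ' '],
        PySem.Int.floordiv st.2 79)) (acc, t)
    = (acc ++ (List.range l.length).map (pvDig t),
       PySem.Int.floordiv t ((79:Int) ^ l.length)) := by
  induction l with
  | nil => intro t acc; simp
  | cons x xs ih =>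
    intro t acc
    simp only [List.foldl_cons, ih, List.length_cons, Prod.mk.injEq]
    refine ⟨?_, pvFdivStep t xs.length⟩
    rw [List.append_assoc, List.range_succ_eq_map, List.map_cons, List.map_map,
        List.singleton_append]
    congr 1
    refine List.cons_eq_cons.mpr ⟨by simp [pvDig, pvCh], ?_⟩
    refine List.map_congr_left (fun a _ => ?_)
    simpa [Function.comp, Nat.add_comm] using pvDigShiftPow t 1 a

-- B's divide-and-conquer produces exactly those digits, most-significant first.
theorem pvAltGo_eq (n : Nat) : ∀ (idx : Int),
    pvAltGo idx n = ((List.range n).map (pvDig idx)).reverse := by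
  induction n using Nat.strong_induction_on with
  | _ n ih =>
    match n with
    | 0 => intro idx; simp [pvAltGo]
    | 1 =>
      intro idx
      rw [pvAltGo, show (List.range 1) = [0] from rfl]
      simp only [List.map_cons, List.map_nil, List.reverse_cons, List.reverse_nil,
        List.nil_append]
      congr 1
      unfold pvDig pvCh
      rw [pvLen, pow_zero, pvFdivOne]
    | n + 2 =>
      intro idx
      rw [pvAltGo, pvLen]
      have hlo : (n + 2) / 2 < n + 2 := by omega
      have hhi : (n + 2) - (n + 2) / 2 < n + 2 := by omega
      have hsplit : List.range (n + 2)
          = List.range ((n + 2) / 2)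
            ++ (List.range ((n + 2) - (n + 2) / 2)).map ((n + 2) / 2 + ·) := by
        rw [← List.range_add]
        congr 1
        omega
      rw [ih _ hhi, ih _ hlo, hsplit, List.map_append, List.reverse_append, List.map_map]
      congr 2
      refine List.map_congr_left (fun k _ => ?_)
      simpa [Function.comp] using pvDigShiftPow idx ((n + 2) / 2) k

-- ===== VERDICT =====
theorem idx_to_guess_py_spec : Claim_equal_idx_to_guess_py := by
  intro idx length _
  show idx_to_guess_py idx length = idx_to_guess_py_alt idx length
  simp only [idx_to_guess_py, idx_to_guess_py_alt, pvLen,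
    PySem.List.pyRange_one 0 length, pvLoop, List.nil_append,
    List.length_map, List.length_range, pvAltGo_eq, Int.sub_zero]
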